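-- pv_equiv track=rewrite | github.com/samsamsam34/wildfire_app | backend/homeowner_report.py | _de_jargonize
-- ===== SOURCE A (Python) =====
-- def _de_jargonize(text: str) -> str:
--     normalized = str(text or "").strip()
--     if not normalized:
--         return ""
--     replacements = {
--         "fuel model": "vegetation and dry brush conditions",
--         "canopy": "tree cover",
--         "ember exposure": "wind-blown ember exposure",
--         "flame-contact": "direct flame contact",
--     }
--     lowered = normalized.lower()
--     for src, dst in replacements.items():
--         if src in lowered:
--             lowered = lowered.replace(src, dst)
--     if not lowered:
--         return ""
--     return lowered[0].upper() + lowered[1:]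
-- ===== SOURCE B (Python) =====
-- def _de_jargonize(text: str) -> str:
--     normalized = str(text or "").strip()
--     if not normalized:
--         return ""
--     replacements = [
--         ("fuel model", "vegetation and dry brush conditions"),
--         ("canopy", "tree cover"),
--         ("ember exposure", "wind-blown ember exposure"),
--         ("flame-contact", "direct flame contact"),
--     ]
--     s = normalized.lower()
--     out = []
--     i = 0
--     n = len(s)
--     while i < n:
--         for src, dst in replacements:
--             if s.startswith(src, i):
--                 out.append(dst)
--                 i += len(src)
--                 break
--         else:
--             out.append(s[i])
--             i += 1
--     res = "".join(out)
--     return res[0].upper() + res[1:]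
-- ===== Notes on version B (the rewrite author's own statement) =====
-- stated objective: alternative
-- what changed: A runs four separate full-string str.replace passes (one per jargon phrase, each after an 'in' scan); B makes a single left-to-right pass over the lowered text, trying the four source phrases at each position and jumping past each replacement, so no pass ever rescans earlier output.
-- intended difference: On text whose stripped lowercase form contains 'flame-contaccanopy', A's 'canopy'->'tree cover' pass splices a new 'flame-contact' out of the preceding text and the inserted 't', and A's later pass rewrites it to 'direct flame contact'; B leaves 'flame-contactree cover'; B's value is intended because the source text never contained the 'flame-contact' jargon — A's rewrite is an accidental cascade of its sequential passes. — e.g. on _de_jargonize("flame-contaccanopy"): A returns "Direct flame contactree cover", B returns "Flame-contactree cover"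
import Mathlib
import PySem

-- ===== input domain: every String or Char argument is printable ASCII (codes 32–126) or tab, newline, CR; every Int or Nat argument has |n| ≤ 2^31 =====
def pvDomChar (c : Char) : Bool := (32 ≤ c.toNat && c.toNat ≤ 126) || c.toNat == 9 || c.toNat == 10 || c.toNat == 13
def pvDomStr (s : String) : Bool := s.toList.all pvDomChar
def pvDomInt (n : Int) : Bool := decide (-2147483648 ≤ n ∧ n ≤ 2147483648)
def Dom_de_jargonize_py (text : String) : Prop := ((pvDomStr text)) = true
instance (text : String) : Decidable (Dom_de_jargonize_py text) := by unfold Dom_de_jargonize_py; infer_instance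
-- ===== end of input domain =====

-- B replaces A's four sequential full-string `str.replace` passes by a single left-to-right
-- scan trying the four phrases at each position; on the cascade inputs described at D_ below
-- the two intentionally differ, everywhere else they agree (proved).

-- ===== PORT A =====
-- x[0].upper() + x[1:], on the character list (both programs reach it only with a nonempty
-- list; both Pythons end in this same expression, so the two ports share it)
def pyCapFirst : List Char → String
  | [] => ""
  | c :: t => String.ofList (PySem.Chars.upperChar c :: t)

def de_jargonize_py (text : String) : String :=
  let normalized := PySem.Str.strip (if text = "" then "" else text)  -- str(text or "").strip()
  if normalized = "" then ""
  else
    let lowered := PySem.Str.lower normalized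
    -- for src, dst in replacements.items(): if src in lowered: lowered = lowered.replace(src, dst)
    let l1 := if PySem.Str.isIn "fuel model" lowered then PySem.Str.replace lowered "fuel model" "vegetation and dry brush conditions" else lowered
    let l2 := if PySem.Str.isIn "canopy" l1 then PySem.Str.replace l1 "canopy" "tree cover" else l1
    let l3 := if PySem.Str.isIn "ember exposure" l2 then PySem.Str.replace l2 "ember exposure" "wind-blown ember exposure" else l2
    let l4 := if PySem.Str.isIn "flame-contact" l3 then PySem.Str.replace l3 "flame-contact" "direct flame contact" else l3
    if l4 = "" then "" else pyCapFirst l4.toList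

-- ===== PORT B =====
-- the replacement table of Source B, as character lists
def jP1 : List Char := "fuel model".toList
def jD1 : List Char := "vegetation and dry brush conditions".toList
def jP2 : List Char := "canopy".toList
def jD2 : List Char := "tree cover".toList
def jP3 : List Char := "ember exposure".toList
def jD3 : List Char := "wind-blown ember exposure".toList
def jP4 : List Char := "flame-contact".toList
def jD4 : List Char := "direct flame contact".toList

-- Source B's while loop: at each position try the four sources in order (s.startswith(src, i));
-- on a match emit dst and jump len(src) characters, otherwise emit the character and move on
def scanJargon : List Char → List Char
  | [] => []
  | c :: t =>
    if jP1.isPrefixOf (c :: t) then jD1 ++ scanJargon ((c :: t).drop 10)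
    else if jP2.isPrefixOf (c :: t) then jD2 ++ scanJargon ((c :: t).drop 6)
    else if jP3.isPrefixOf (c :: t) then jD3 ++ scanJargon ((c :: t).drop 14)
    else if jP4.isPrefixOf (c :: t) then jD4 ++ scanJargon ((c :: t).drop 13)
    else c :: scanJargon t
  termination_by s => s.length
  decreasing_by all_goals (simp; try omega)

def de_jargonize_py_alt (text : String) : String :=
  let normalized := PySem.Str.strip (if text = "" then "" else text)  -- str(text or "").strip()
  if normalized = "" then ""
  else pyCapFirst (scanJargon (PySem.Str.lower normalized).toList)

-- ===== PRECONDITION & SPEC =====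
-- On text whose stripped lowercase form contains "flame-contaccanopy", A's second pass ("canopy" →
-- "tree cover") splices a brand-new "flame-contact" out of the preceding text and the inserted
-- "t", and A's fourth pass then rewrites it to "direct flame contact"; B's single pass leaves
-- "flame-contactree cover" there. B's value is intended: the source text never contained the
-- "flame-contact" jargon, A's rewrite of it is an accidental cascade of its sequential passes.
def D_de_jargonize_py (text : String) : Prop :=
  PySem.Str.isIn "flame-contaccanopy" (PySem.Str.lower (PySem.Str.strip text)) = true
instance (text : String) : Decidable (D_de_jargonize_py text) := by unfold D_de_jargonize_py; infer_instance

def Spec_de_jargonize_py (text : String) (out : String) : Prop :=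
  ¬ D_de_jargonize_py text → out = de_jargonize_py_alt text
instance (text : String) (out : String) : Decidable (Spec_de_jargonize_py text out) := by
  unfold Spec_de_jargonize_py; infer_instance

def pvDiffWitness_de_jargonize_py : String := "flame-contaccanopy"
def pvDiffWitnessOut_de_jargonize_py : String × String :=
  ("Direct flame contactree cover", "Flame-contactree cover")

-- ===== CLAIM =====
def Claim_unchanged_de_jargonize_py : Prop :=
  ∀ (text : String), Dom_de_jargonize_py text → Spec_de_jargonize_py text (de_jargonize_py text)
def Claim_changed_de_jargonize_py : Prop :=
  Dom_de_jargonize_py (pvDiffWitness_de_jargonize_py) ∧ D_de_jargonize_py (pvDiffWitness_de_jargonize_py) ∧ de_jargonize_py (pvDiffWitness_de_jargonize_py) = pvDiffWitnessOut_de_jargonize_py.1 ∧ de_jargonize_py_alt (pvDiffWitness_de_jargonize_py) = pvDiffWitnessOut_de_jargonize_py.2 ∧ pvDiffWitnessOut_de_jargonize_py.1 ≠ pvDiffWitnessOut_de_jargonize_py.2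
def Claim_exact_de_jargonize_py : Prop :=
  ∀ (text : String), Dom_de_jargonize_py text → D_de_jargonize_py text → de_jargonize_py text ≠ de_jargonize_py_alt text

-- ===== LEMMAS AND PROOFS =====

-- one occurrence-by-occurrence replacement pass (the semantics of CPython's str.replace,
-- i.e. of PySem.Chars.replace, for a nonempty pattern ph :: pt)
def replOcc (ph : Char) (pt d : List Char) : List Char → List Char
  | [] => []
  | c :: t =>
    if (ph :: pt).isPrefixOf (c :: t) then d ++ replOcc ph pt d (t.drop pt.length)
    else c :: replOcc ph pt d t
  termination_by s => s.length
  decreasing_by all_goals (simp; try omega)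

-- A's four passes, as replOcc
def jR1 (l : List Char) : List Char := replOcc 'f' "uel model".toList jD1 l
def jR2 (l : List Char) : List Char := replOcc 'c' "anopy".toList jD2 l
def jR3 (l : List Char) : List Char := replOcc 'e' "mber exposure".toList jD3 l
def jR4 (l : List Char) : List Char := replOcc 'f' "lame-contact".toList jD4 l

def jFC : List Char := "flame-contaccanopy".toList

lemma jP1c : jP1 = 'f' :: "uel model".toList := by decide
lemma jP2c : jP2 = 'c' :: "anopy".toList := by decide
lemma jP3c : jP3 = 'e' :: "mber exposure".toList := by decide
lemma jP4c : jP4 = 'f' :: "lame-contact".toList := by decide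

lemma replOcc_nil (ph : Char) (pt d : List Char) : replOcc ph pt d [] = [] := by rw [replOcc]

lemma replOcc_cons_pos {ph : Char} {pt : List Char} (d : List Char) {c : Char} {t : List Char}
    (h : (ph :: pt) <+: (c :: t)) :
    replOcc ph pt d (c :: t) = d ++ replOcc ph pt d (t.drop pt.length) := by
  rw [replOcc, if_pos (List.isPrefixOf_iff_prefix.mpr h)]

lemma replOcc_cons_neg {ph : Char} {pt : List Char} (d : List Char) {c : Char} {t : List Char}
    (h : ¬ (ph :: pt) <+: (c :: t)) :
    replOcc ph pt d (c :: t) = c :: replOcc ph pt d t := by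
  rw [replOcc, if_neg (by simpa [List.isPrefixOf_iff_prefix] using h)]

lemma replOcc_emit (ph : Char) (pt d x : List Char) :
    replOcc ph pt d ((ph :: pt) ++ x) = d ++ replOcc ph pt d x := by
  rw [List.cons_append,
    replOcc_cons_pos d (List.cons_prefix_cons.mpr ⟨rfl, pt.prefix_append x⟩), List.drop_left]

lemma prefix_append_split {α : Type} {p u x : List α} (h : p <+: u ++ x) : p <+: u ∨ u <+: p := by
  by_cases hl : p.length ≤ u.length
  · exact Or.inl (List.prefix_of_prefix_length_le h (u.prefix_append x) hl)
  · exact Or.inr (List.prefix_of_prefix_length_le (u.prefix_append x) h (by omega))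

lemma go_eq_replOcc (ph : Char) (pt d : List Char) :
    ∀ (fuel : Nat) (l acc : List Char), l.length ≤ fuel →
      PySem.Chars.replace.go (ph :: pt) d fuel l acc = acc.reverse ++ replOcc ph pt d l := by
  intro fuel
  induction fuel with
  | zero =>
    intro l acc hl
    have h0 : l = [] := List.eq_nil_of_length_eq_zero (by omega)
    subst h0
    rw [replOcc_nil]
    rfl
  | succ fuel ih =>
    intro l acc hl
    cases l with
    | nil =>
      have hgo : PySem.Chars.replace.go (ph :: pt) d (fuel + 1) [] acc = acc.reverse := rfl
      rw [hgo, replOcc_nil, List.append_nil]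
    | cons c t =>
      have hgo : PySem.Chars.replace.go (ph :: pt) d (fuel + 1) (c :: t) acc
          = if (ph :: pt).isPrefixOf (c :: t) then
              PySem.Chars.replace.go (ph :: pt) d fuel ((c :: t).drop (ph :: pt).length) (d.reverse ++ acc)
            else PySem.Chars.replace.go (ph :: pt) d fuel t (c :: acc) := rfl
      rw [hgo]
      by_cases hp : (ph :: pt).isPrefixOf (c :: t)
      · rw [if_pos hp]
        have hlen : ((c :: t).drop (ph :: pt).length).length ≤ fuel := by
          simp only [List.length_drop, List.length_cons] at *
          omega
        rw [ih _ _ hlen, replOcc_cons_pos d (List.isPrefixOf_iff_prefix.mp hp)]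
        have hd : (c :: t).drop (ph :: pt).length = t.drop pt.length := by
          simp [List.drop_succ_cons]
        rw [hd]
        simp [List.reverse_append]
      · rw [if_neg hp]
        have hlen : t.length ≤ fuel := by simp at hl; omega
        rw [ih _ _ hlen, replOcc_cons_neg d (by simpa [List.isPrefixOf_iff_prefix] using hp)]
        simp

lemma replace_eq_replOcc (ph : Char) (pt d l : List Char) :
    PySem.Chars.replace l (ph :: pt) d = replOcc ph pt d l := by
  rw [PySem.Chars.replace]
  simp only [List.isEmpty_cons, Bool.false_eq_true, if_false]
  simpa using go_eq_replOcc ph pt d l.length l [] le_rfl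

lemma replOcc_of_not_isIn {ph : Char} {pt : List Char} (d : List Char) {l : List Char}
    (h : PySem.Chars.isIn (ph :: pt) l = false) : replOcc ph pt d l = l := by
  induction l with
  | nil => exact replOcc_nil _ _ _
  | cons c t ih =>
    have hinf : ¬ (ph :: pt) <:+: (c :: t) := (PySem.Chars.isIn_eq_false_iff _ _).mp h
    have hp : ¬ (ph :: pt) <+: (c :: t) := fun hp => hinf hp.isInfix
    rw [replOcc_cons_neg d hp,
      ih ((PySem.Chars.isIn_eq_false_iff _ _).mpr
        (fun h' => hinf (h'.trans (List.suffix_cons c t).isInfix)))]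

lemma stepChars_eq (ph : Char) (pt d l : List Char) :
    (if PySem.Chars.isIn (ph :: pt) l then PySem.Chars.replace l (ph :: pt) d else l)
      = replOcc ph pt d l := by
  cases h : PySem.Chars.isIn (ph :: pt) l with
  | true => rw [if_pos rfl, replace_eq_replOcc]
  | false => rw [if_neg (by simp), replOcc_of_not_isIn d h]

-- a pass slides over a block u that cannot interact with its pattern
lemma skipRepl (ph : Char) (pt d : List Char) (u : List Char) :
    (∀ t ∈ u.tails, t ≠ [] → ¬ t <+: (ph :: pt) ∧ ¬ (ph :: pt) <+: t) →
    ∀ x : List Char, replOcc ph pt d (u ++ x) = u ++ replOcc ph pt d x := by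
  induction u with
  | nil => intro _ x; simp
  | cons c u' ih =>
    intro h x
    have hcc := h (c :: u') ((List.mem_tails _ _).mpr List.suffix_rfl) (by simp)
    have hnp : ¬ (ph :: pt) <+: (c :: (u' ++ x)) := by
      intro hp
      rcases prefix_append_split (p := ph :: pt) (u := c :: u') (x := x) (by simpa using hp) with h1 | h2
      · exact hcc.2 h1
      · exact hcc.1 h2
    have ih' := ih (fun t ht hne =>
      h t ((List.mem_tails _ _).mpr (((List.mem_tails _ _).mp ht).trans (List.suffix_cons c u'))) hne) x
    calc replOcc ph pt d ((c :: u') ++ x) = replOcc ph pt d (c :: (u' ++ x)) := by simp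
      _ = c :: replOcc ph pt d (u' ++ x) := replOcc_cons_neg d hnp
      _ = (c :: u') ++ replOcc ph pt d x := by rw [ih']; rfl

-- a pass whose replacement text cannot complete any suffix of p' preserves "p' is no prefix"
lemma keepNoPrefix (ph : Char) (pt d : List Char) (p' : List Char)
    (hC : ∀ j < p'.length, ¬ (p'.drop j <+: d) ∧ ¬ (d <+: p'.drop j)) :
    ∀ (l : List Char) (j : Nat), j < p'.length → ¬ p'.drop j <+: l →
      ¬ p'.drop j <+: replOcc ph pt d l := by
  intro l
  induction l with
  | nil => intro j _ hl; rw [replOcc_nil]; exact hl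
  | cons c t ih =>
    intro j hj hl
    by_cases hp : (ph :: pt) <+: (c :: t)
    · rw [replOcc_cons_pos d hp]
      intro hq
      rcases prefix_append_split hq with h1 | h2
      · exact (hC j hj).1 h1
      · exact (hC j hj).2 h2
    · rw [replOcc_cons_neg d hp]
      intro hq
      have hne : p'.drop j ≠ [] := by rw [Ne, List.drop_eq_nil_iff]; omega
      obtain ⟨a, qt, hqe⟩ := List.exists_cons_of_ne_nil hne
      rw [hqe, List.cons_prefix_cons] at hq
      obtain ⟨heq, hq2⟩ := hq
      rw [heq] at hqe
      have hqt : qt = p'.drop (j + 1) := by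
        have h1 := List.tail_drop (l := p') (i := j)
        rw [hqe] at h1
        simpa using h1
      by_cases hj1 : j + 1 < p'.length
      · have hl' : ¬ p'.drop (j + 1) <+: t := by
          intro hcon
          exact hl (by rw [hqe]; exact List.cons_prefix_cons.mpr ⟨rfl, hqt ▸ hcon⟩)
        exact ih (j + 1) hj1 hl' (hqt ▸ hq2)
      · have hqnil : qt = [] := by rw [hqt, List.drop_eq_nil_iff]; omega
        exact hl (by rw [hqe, hqnil]; exact List.cons_prefix_cons.mpr ⟨rfl, List.nil_prefix⟩)

lemma keepNoPrefix0 (ph : Char) (pt d : List Char) (p' : List Char)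
    (hC : ∀ j < p'.length, ¬ (p'.drop j <+: d) ∧ ¬ (d <+: p'.drop j))
    (hlen : 0 < p'.length) {l : List Char} (h : ¬ p' <+: l) :
    ¬ p' <+: replOcc ph pt d l := by
  have := keepNoPrefix ph pt d p' hC l 0 hlen (by simpa using h)
  simpa using this

-- the one genuine interaction: the canopy pass can complete "flame-contact" only out of
-- "flame-contaccanopy"; absent that substring it too preserves "flame-contact is no prefix"
lemma keepNoPrefixP4 :
    ∀ (l : List Char) (j : Nat), j < 13 → ¬ jP4.drop j <+: l → ¬ jFC.drop j <+: l →
      ¬ jP4.drop j <+: replOcc 'c' "anopy".toList jD2 l := by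
  intro l
  induction l with
  | nil => intro j _ h1 _; rw [replOcc_nil]; exact h1
  | cons c t ih =>
    intro j hj h1 h2
    by_cases hp : ('c' :: "anopy".toList) <+: (c :: t)
    · rw [replOcc_cons_pos jD2 hp]
      by_cases hj12 : j = 12
      · subst hj12
        exact absurd (show jFC.drop 12 <+: c :: t by
          rw [show jFC.drop 12 = 'c' :: "anopy".toList from by decide]; exact hp) h2
      · intro hq
        have f1 : ¬ (jP4.drop j <+: jD2) ∧ ¬ (jD2 <+: jP4.drop j) := by
          have all12 : ∀ j, j < 13 → j ≠ 12 → ¬ (jP4.drop j <+: jD2) ∧ ¬ (jD2 <+: jP4.drop j) := by decide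
          exact all12 j hj hj12
        rcases prefix_append_split hq with ha | hb
        · exact f1.1 ha
        · exact f1.2 hb
    · rw [replOcc_cons_neg jD2 hp]
      intro hq
      have hne : jP4.drop j ≠ [] := by
        rw [Ne, List.drop_eq_nil_iff, show jP4.length = 13 from by decide]; omega
      obtain ⟨a, qt, hqe⟩ := List.exists_cons_of_ne_nil hne
      rw [hqe, List.cons_prefix_cons] at hq
      obtain ⟨heq, hq2⟩ := hq
      rw [heq] at hqe
      have hqt : qt = jP4.drop (j + 1) := by
        have h' := List.tail_drop (l := jP4) (i := j)
        rw [hqe] at h'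
        simpa using h'
      by_cases hj12 : j = 12
      · subst hj12
        exact h1 (by
          rw [hqe, show qt = [] from by rw [hqt]; decide]
          exact List.cons_prefix_cons.mpr ⟨rfl, List.nil_prefix⟩)
      · have hj1 : j + 1 < 13 := by omega
        have hFCne : jFC.drop j ≠ [] := by
          rw [Ne, List.drop_eq_nil_iff, show jFC.length = 18 from by decide]; omega
        obtain ⟨b, ft, hfe⟩ := List.exists_cons_of_ne_nil hFCne
        have hbc : b = c := by
          have f4 : ∀ j, j < 12 → (jFC.drop j).take 1 = (jP4.drop j).take 1 := by decide
          have h4 := f4 j (by omega)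
          rw [hfe, hqe] at h4
          simpa using h4
        have hft : ft = jFC.drop (j + 1) := by
          have h' := List.tail_drop (l := jFC) (i := j)
          rw [hfe] at h'
          simpa [hbc] using h'
        have h2' : ¬ jFC.drop (j + 1) <+: t := by
          intro hcon
          exact h2 (by rw [hfe, hbc]; exact List.cons_prefix_cons.mpr ⟨rfl, hft ▸ hcon⟩)
        have h1' : ¬ jP4.drop (j + 1) <+: t := by
          intro hcon
          exact h1 (by rw [hqe]; exact List.cons_prefix_cons.mpr ⟨rfl, hqt ▸ hcon⟩)
        exact ih (j + 1) hj1 h1' h2' (hqt ▸ hq2)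

lemma keepNoPrefixP4_0 {l : List Char} (h1 : ¬ jP4 <+: l) (h2 : ¬ jFC <+: l) :
    ¬ jP4 <+: replOcc 'c' "anopy".toList jD2 l := by
  have := keepNoPrefixP4 l 0 (by omega) (by simpa using h1) (by simpa using h2)
  simpa using this

lemma scanJ_cons (c : Char) (t : List Char) :
    scanJargon (c :: t) =
      if jP1.isPrefixOf (c :: t) then jD1 ++ scanJargon ((c :: t).drop 10)
      else if jP2.isPrefixOf (c :: t) then jD2 ++ scanJargon ((c :: t).drop 6)
      else if jP3.isPrefixOf (c :: t) then jD3 ++ scanJargon ((c :: t).drop 14)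
      else if jP4.isPrefixOf (c :: t) then jD4 ++ scanJargon ((c :: t).drop 13)
      else c :: scanJargon t := by
  rw [scanJargon]

-- the ghost scanner that describes A's four sequential passes on EVERY input: it is B's scan
-- plus one extra first rule, the cascade "flame-contaccanopy" → "direct flame contactree cover"
def jCC : List Char := "flame-contac".toList
def jDC : List Char := "direct flame contactree cover".toList

def scanC : List Char → List Char
  | [] => []
  | c :: t =>
    if jFC.isPrefixOf (c :: t) then jDC ++ scanC ((c :: t).drop 18)
    else if jP1.isPrefixOf (c :: t) then jD1 ++ scanC ((c :: t).drop 10)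
    else if jP2.isPrefixOf (c :: t) then jD2 ++ scanC ((c :: t).drop 6)
    else if jP3.isPrefixOf (c :: t) then jD3 ++ scanC ((c :: t).drop 14)
    else if jP4.isPrefixOf (c :: t) then jD4 ++ scanC ((c :: t).drop 13)
    else c :: scanC t
  termination_by s => s.length
  decreasing_by all_goals (simp; try omega)

lemma scanC_cons (c : Char) (t : List Char) :
    scanC (c :: t) =
      if jFC.isPrefixOf (c :: t) then jDC ++ scanC ((c :: t).drop 18)
      else if jP1.isPrefixOf (c :: t) then jD1 ++ scanC ((c :: t).drop 10)
      else if jP2.isPrefixOf (c :: t) then jD2 ++ scanC ((c :: t).drop 6)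
      else if jP3.isPrefixOf (c :: t) then jD3 ++ scanC ((c :: t).drop 14)
      else if jP4.isPrefixOf (c :: t) then jD4 ++ scanC ((c :: t).drop 13)
      else c :: scanC t := by
  rw [scanC]

lemma npx {P u : List Char} (h1 : ¬ P <+: u) (h2 : ¬ u <+: P) {x : List Char}
    (h : P <+: u ++ x) : False :=
  (prefix_append_split h).elim h1 h2

lemma npb (P : List Char) (c : Char) (v : List Char) (h1 : ¬ P <+: (c :: v)) (h2 : ¬ (c :: v) <+: P)
    {x : List Char} : ¬ (P.isPrefixOf (c :: (v ++ x)) = true) := fun hh =>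
  npx h1 h2 (P := P) (u := c :: v) (x := x) (List.isPrefixOf_iff_prefix.mp hh)

-- a pass slides over u when its pattern fails at every position of u with the lookahead v
lemma skipKnown (ph : Char) (pt d v : List Char) :
    ∀ (u : List Char),
      (∀ j < u.length, ¬ (ph :: pt) <+: (u ++ v).drop j ∧ ¬ (u ++ v).drop j <+: (ph :: pt)) →
      ∀ x : List Char, replOcc ph pt d ((u ++ v) ++ x) = u ++ replOcc ph pt d (v ++ x) := by
  intro u
  induction u with
  | nil => intro _ x; simp
  | cons c u' ih =>
    intro hC x
    have h0 := hC 0 (by simp)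
    simp only [List.drop_zero] at h0
    have hnp : ¬ (ph :: pt) <+: (c :: ((u' ++ v) ++ x)) := fun hp =>
      npx h0.1 h0.2 (P := ph :: pt) (u := (c :: u') ++ v) (x := x) hp
    have e : ((c :: u') ++ v) ++ x = c :: ((u' ++ v) ++ x) := by simp
    rw [e, replOcc_cons_neg d hnp,
      ih (fun j hj => by simpa using hC (j + 1) (by simp; omega)) x]
    rfl

-- A's four passes equal the ghost scanner, on every input
lemma chainC_eq : ∀ (n : Nat) (l : List Char), l.length ≤ n →
    scanC l = jR4 (jR3 (jR2 (jR1 l))) := by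
  intro n
  induction n with
  | zero =>
    intro l hl
    have h0 : l = [] := List.eq_nil_of_length_eq_zero (by omega)
    subst h0
    rw [show scanC [] = [] from by rw [scanC]]
    simp [jR1, jR2, jR3, jR4, replOcc_nil]
  | succ n ih =>
    intro l hl
    cases l with
    | nil =>
      rw [show scanC [] = [] from by rw [scanC]]
      simp [jR1, jR2, jR3, jR4, replOcc_nil]
    | cons c t =>
      by_cases hFC : jFC <+: (c :: t)
      · -- l = "flame-contaccanopy" ++ r : the cascade
        obtain ⟨r, hr⟩ := hFC
        have hdrop : (c :: t).drop 18 = r := by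
          rw [← hr, show (18 : Nat) = jFC.length from by decide, List.drop_left]
        have hscan : scanC (c :: t) = jDC ++ scanC r := by
          rw [scanC_cons, if_pos (List.isPrefixOf_iff_prefix.mpr ⟨r, hr⟩), hdrop]
        have hr' : r.length ≤ n := by
          have hlen := congrArg List.length hdrop
          simp only [List.length_drop, List.length_cons] at hlen
          simp only [List.length_cons] at hl
          omega
        rw [hscan, ← hr]
        simp only [jR1, jR2, jR3, jR4]
        rw [skipRepl 'f' "uel model".toList jD1 jFC (by decide) r,
          show jFC = jCC ++ jP2 from by decide,
          skipKnown 'c' "anopy".toList jD2 jP2 jCC (by decide),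
          jP2c, replOcc_emit 'c' "anopy".toList jD2,
          ← List.append_assoc jCC jD2,
          skipRepl 'e' "mber exposure".toList jD3 (jCC ++ jD2) (by decide),
          show jCC ++ jD2 = jP4 ++ "ree cover".toList from by decide,
          List.append_assoc jP4 "ree cover".toList,
          jP4c, replOcc_emit 'f' "lame-contact".toList jD4,
          skipRepl 'f' "lame-contact".toList jD4 "ree cover".toList (by decide)]
        rw [show ∀ y, replOcc 'f' "uel model".toList jD1 y = jR1 y from fun _ => rfl,
          show ∀ y, replOcc 'c' "anopy".toList jD2 y = jR2 y from fun _ => rfl,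
          show ∀ y, replOcc 'e' "mber exposure".toList jD3 y = jR3 y from fun _ => rfl,
          show ∀ y, replOcc 'f' "lame-contact".toList jD4 y = jR4 y from fun _ => rfl]
        rw [ih r hr', show jDC = jD4 ++ "ree cover".toList from by decide]
        simp [List.append_assoc]
      · by_cases h1 : jP1 <+: (c :: t)
        · -- l = "fuel model" ++ r
          obtain ⟨r, hr⟩ := h1
          have hdrop : (c :: t).drop 10 = r := by
            rw [← hr, show (10 : Nat) = jP1.length from by decide, List.drop_left]
          have hscan : scanC (c :: t) = jD1 ++ scanC r := by
            rw [scanC_cons, if_neg (by simpa [List.isPrefixOf_iff_prefix] using hFC),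
              if_pos (List.isPrefixOf_iff_prefix.mpr ⟨r, hr⟩), hdrop]
          have hr' : r.length ≤ n := by
            have hlen := congrArg List.length hdrop
            simp only [List.length_drop, List.length_cons] at hlen
            simp only [List.length_cons] at hl
            omega
          rw [hscan, ← hr]
          simp only [jR1, jR2, jR3, jR4]
          rw [jP1c, replOcc_emit 'f' "uel model".toList jD1 r,
            skipRepl 'c' "anopy".toList jD2 jD1 (by decide),
            skipRepl 'e' "mber exposure".toList jD3 jD1 (by decide),
            skipRepl 'f' "lame-contact".toList jD4 jD1 (by decide)]
          rw [show replOcc 'f' "uel model".toList jD1 r = jR1 r from rfl]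
          rw [show ∀ y, replOcc 'c' "anopy".toList jD2 y = jR2 y from fun _ => rfl,
            show ∀ y, replOcc 'e' "mber exposure".toList jD3 y = jR3 y from fun _ => rfl,
            show ∀ y, replOcc 'f' "lame-contact".toList jD4 y = jR4 y from fun _ => rfl]
          rw [ih r hr']
        · by_cases h2 : jP2 <+: (c :: t)
          · -- l = "canopy" ++ r
            obtain ⟨r, hr⟩ := h2
            have hdrop : (c :: t).drop 6 = r := by
              rw [← hr, show (6 : Nat) = jP2.length from by decide, List.drop_left]
            have hscan : scanC (c :: t) = jD2 ++ scanC r := by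
              rw [scanC_cons, if_neg (by simpa [List.isPrefixOf_iff_prefix] using hFC),
                if_neg (by simpa [List.isPrefixOf_iff_prefix] using h1),
                if_pos (List.isPrefixOf_iff_prefix.mpr ⟨r, hr⟩), hdrop]
            have hr' : r.length ≤ n := by
              have hlen := congrArg List.length hdrop
              simp only [List.length_drop, List.length_cons] at hlen
              simp only [List.length_cons] at hl
              omega
            rw [hscan, ← hr]
            simp only [jR1, jR2, jR3, jR4]
            rw [skipRepl 'f' "uel model".toList jD1 jP2 (by decide),
              jP2c, replOcc_emit 'c' "anopy".toList jD2 _,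
              skipRepl 'e' "mber exposure".toList jD3 jD2 (by decide),
              skipRepl 'f' "lame-contact".toList jD4 jD2 (by decide)]
            rw [show ∀ y, replOcc 'f' "uel model".toList jD1 y = jR1 y from fun _ => rfl,
              show ∀ y, replOcc 'c' "anopy".toList jD2 y = jR2 y from fun _ => rfl,
              show ∀ y, replOcc 'e' "mber exposure".toList jD3 y = jR3 y from fun _ => rfl,
              show ∀ y, replOcc 'f' "lame-contact".toList jD4 y = jR4 y from fun _ => rfl]
            rw [ih r hr']
          · by_cases h3 : jP3 <+: (c :: t)
            · -- l = "ember exposure" ++ r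
              obtain ⟨r, hr⟩ := h3
              have hdrop : (c :: t).drop 14 = r := by
                rw [← hr, show (14 : Nat) = jP3.length from by decide, List.drop_left]
              have hscan : scanC (c :: t) = jD3 ++ scanC r := by
                rw [scanC_cons, if_neg (by simpa [List.isPrefixOf_iff_prefix] using hFC),
                  if_neg (by simpa [List.isPrefixOf_iff_prefix] using h1),
                  if_neg (by simpa [List.isPrefixOf_iff_prefix] using h2),
                  if_pos (List.isPrefixOf_iff_prefix.mpr ⟨r, hr⟩), hdrop]
              have hr' : r.length ≤ n := by
                have hlen := congrArg List.length hdrop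
                simp only [List.length_drop, List.length_cons] at hlen
                simp only [List.length_cons] at hl
                omega
              rw [hscan, ← hr]
              simp only [jR1, jR2, jR3, jR4]
              rw [skipRepl 'f' "uel model".toList jD1 jP3 (by decide),
                skipRepl 'c' "anopy".toList jD2 jP3 (by decide),
                jP3c, replOcc_emit 'e' "mber exposure".toList jD3 _,
                skipRepl 'f' "lame-contact".toList jD4 jD3 (by decide)]
              rw [show ∀ y, replOcc 'f' "uel model".toList jD1 y = jR1 y from fun _ => rfl,
                show ∀ y, replOcc 'c' "anopy".toList jD2 y = jR2 y from fun _ => rfl,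
                show ∀ y, replOcc 'e' "mber exposure".toList jD3 y = jR3 y from fun _ => rfl,
                show ∀ y, replOcc 'f' "lame-contact".toList jD4 y = jR4 y from fun _ => rfl]
              rw [ih r hr']
            · by_cases h4 : jP4 <+: (c :: t)
              · -- l = "flame-contact" ++ r
                obtain ⟨r, hr⟩ := h4
                have hdrop : (c :: t).drop 13 = r := by
                  rw [← hr, show (13 : Nat) = jP4.length from by decide, List.drop_left]
                have hscan : scanC (c :: t) = jD4 ++ scanC r := by
                  rw [scanC_cons, if_neg (by simpa [List.isPrefixOf_iff_prefix] using hFC),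
                    if_neg (by simpa [List.isPrefixOf_iff_prefix] using h1),
                    if_neg (by simpa [List.isPrefixOf_iff_prefix] using h2),
                    if_neg (by simpa [List.isPrefixOf_iff_prefix] using h3),
                    if_pos (List.isPrefixOf_iff_prefix.mpr ⟨r, hr⟩), hdrop]
                have hr' : r.length ≤ n := by
                  have hlen := congrArg List.length hdrop
                  simp only [List.length_drop, List.length_cons] at hlen
                  simp only [List.length_cons] at hl
                  omega
                rw [hscan, ← hr]
                simp only [jR1, jR2, jR3, jR4]
                rw [skipRepl 'f' "uel model".toList jD1 jP4 (by decide),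
                  skipRepl 'c' "anopy".toList jD2 jP4 (by decide),
                  skipRepl 'e' "mber exposure".toList jD3 jP4 (by decide),
                  jP4c, replOcc_emit 'f' "lame-contact".toList jD4 _]
                rw [show ∀ y, replOcc 'f' "uel model".toList jD1 y = jR1 y from fun _ => rfl,
                  show ∀ y, replOcc 'c' "anopy".toList jD2 y = jR2 y from fun _ => rfl,
                  show ∀ y, replOcc 'e' "mber exposure".toList jD3 y = jR3 y from fun _ => rfl,
                  show ∀ y, replOcc 'f' "lame-contact".toList jD4 y = jR4 y from fun _ => rfl]
                rw [ih r hr']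
              · -- plain character: every pass copies it
                have e1 : jR1 (c :: t) = c :: jR1 t := by
                  simp only [jR1]
                  exact replOcc_cons_neg jD1 (by rw [jP1c] at h1; exact h1)
                have k2 : ¬ jP2 <+: jR1 (c :: t) := by
                  simp only [jR1]
                  exact keepNoPrefix0 _ _ _ jP2 (by decide) (by decide) h2
                have e2 : jR2 (jR1 (c :: t)) = c :: jR2 (jR1 t) := by
                  simp only [jR2]
                  rw [e1]
                  exact replOcc_cons_neg jD2 (by rw [jP2c, e1] at k2; exact k2)
                have k3a : ¬ jP3 <+: jR1 (c :: t) := by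
                  simp only [jR1]
                  exact keepNoPrefix0 _ _ _ jP3 (by decide) (by decide) h3
                have k3 : ¬ jP3 <+: jR2 (jR1 (c :: t)) := by
                  simp only [jR2]
                  exact keepNoPrefix0 _ _ _ jP3 (by decide) (by decide) k3a
                have e3 : jR3 (jR2 (jR1 (c :: t))) = c :: jR3 (jR2 (jR1 t)) := by
                  simp only [jR3]
                  rw [e2]
                  exact replOcc_cons_neg jD3 (by rw [jP3c, e2] at k3; exact k3)
                have k4a : ¬ jP4 <+: jR1 (c :: t) := by
                  simp only [jR1]
                  exact keepNoPrefix0 _ _ _ jP4 (by decide) (by decide) h4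
                have kFC : ¬ jFC <+: jR1 (c :: t) := by
                  simp only [jR1]
                  exact keepNoPrefix0 _ _ _ jFC (by decide) (by decide) hFC
                have k4b : ¬ jP4 <+: jR2 (jR1 (c :: t)) := by
                  simp only [jR2]
                  exact keepNoPrefixP4_0 k4a kFC
                have k4 : ¬ jP4 <+: jR3 (jR2 (jR1 (c :: t))) := by
                  simp only [jR3]
                  exact keepNoPrefix0 _ _ _ jP4 (by decide) (by decide) k4b
                have e4 : jR4 (jR3 (jR2 (jR1 (c :: t)))) = c :: jR4 (jR3 (jR2 (jR1 t))) := by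
                  simp only [jR4]
                  rw [e3]
                  exact replOcc_cons_neg jD4 (by rw [jP4c, e3] at k4; exact k4)
                have hscan : scanC (c :: t) = c :: scanC t := by
                  rw [scanC_cons, if_neg (by simpa [List.isPrefixOf_iff_prefix] using hFC),
                    if_neg (by simpa [List.isPrefixOf_iff_prefix] using h1),
                    if_neg (by simpa [List.isPrefixOf_iff_prefix] using h2),
                    if_neg (by simpa [List.isPrefixOf_iff_prefix] using h3),
                    if_neg (by simpa [List.isPrefixOf_iff_prefix] using h4)]
                have ht : t.length ≤ n := by simp only [List.length_cons] at hl; omega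
                rw [hscan, e4, ih t ht]

-- without the cascade substring the ghost scanner is B's scanner
lemma scanC_eq_scan : ∀ (n : Nat) (l : List Char), l.length ≤ n → ¬ jFC <:+: l →
    scanC l = scanJargon l := by
  intro n
  induction n with
  | zero =>
    intro l hl _
    have h0 : l = [] := List.eq_nil_of_length_eq_zero (by omega)
    subst h0
    rw [show scanC [] = [] from by rw [scanC], show scanJargon [] = [] from by rw [scanJargon]]
  | succ n ih =>
    intro l hl hI
    cases l with
    | nil =>
      rw [show scanC [] = [] from by rw [scanC], show scanJargon [] = [] from by rw [scanJargon]]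
    | cons c t =>
      have hlen : ∀ k : Nat, 0 < k → ((c :: t).drop k).length ≤ n := by
        intro k hk
        simp only [List.length_drop, List.length_cons] at *
        omega
      have hIdrop : ∀ k : Nat, ¬ jFC <:+: (c :: t).drop k := fun k h =>
        hI (h.trans (List.drop_suffix k _).isInfix)
      have hFCb : ¬ jFC.isPrefixOf (c :: t) = true := by
        rw [List.isPrefixOf_iff_prefix]
        exact fun h => hI h.isInfix
      by_cases h1 : jP1.isPrefixOf (c :: t) = true
      · have hC : scanC (c :: t) = jD1 ++ scanC ((c :: t).drop 10) := by
          rw [scanC_cons, if_neg hFCb, if_pos h1]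
        have hJ : scanJargon (c :: t) = jD1 ++ scanJargon ((c :: t).drop 10) := by
          rw [scanJ_cons, if_pos h1]
        rw [hC, hJ, ih _ (hlen 10 (by omega)) (hIdrop 10)]
      · -- next
        by_cases h2 : jP2.isPrefixOf (c :: t) = true
        · have hC : scanC (c :: t) = jD2 ++ scanC ((c :: t).drop 6) := by
            rw [scanC_cons, if_neg hFCb, if_neg h1, if_pos h2]
          have hJ : scanJargon (c :: t) = jD2 ++ scanJargon ((c :: t).drop 6) := by
            rw [scanJ_cons, if_neg h1, if_pos h2]
          rw [hC, hJ, ih _ (hlen 6 (by omega)) (hIdrop 6)]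
        · -- next
          by_cases h3 : jP3.isPrefixOf (c :: t) = true
          · have hC : scanC (c :: t) = jD3 ++ scanC ((c :: t).drop 14) := by
              rw [scanC_cons, if_neg hFCb, if_neg h1, if_neg h2, if_pos h3]
            have hJ : scanJargon (c :: t) = jD3 ++ scanJargon ((c :: t).drop 14) := by
              rw [scanJ_cons, if_neg h1, if_neg h2, if_pos h3]
            rw [hC, hJ, ih _ (hlen 14 (by omega)) (hIdrop 14)]
          · -- next
            by_cases h4 : jP4.isPrefixOf (c :: t) = true
            · have hC : scanC (c :: t) = jD4 ++ scanC ((c :: t).drop 13) := by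
                rw [scanC_cons, if_neg hFCb, if_neg h1, if_neg h2, if_neg h3, if_pos h4]
              have hJ : scanJargon (c :: t) = jD4 ++ scanJargon ((c :: t).drop 13) := by
                rw [scanJ_cons, if_neg h1, if_neg h2, if_neg h3, if_pos h4]
              rw [hC, hJ, ih _ (hlen 13 (by omega)) (hIdrop 13)]
            · -- next
              have hC : scanC (c :: t) = c :: scanC t := by
                rw [scanC_cons, if_neg hFCb, if_neg h1, if_neg h2, if_neg h3, if_neg h4]
              have hJ : scanJargon (c :: t) = c :: scanJargon t := by
                rw [scanJ_cons, if_neg h1, if_neg h2, if_neg h3, if_neg h4]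
              have ht : t.length ≤ n := by simp only [List.length_cons] at hl; omega
              have hIt : ¬ jFC <:+: t := fun h => hI (h.trans (List.suffix_cons c t).isInfix)
              rw [hC, hJ, ih t ht hIt]

lemma scanJargon_eq (n : Nat) (l : List Char) (hl : l.length ≤ n) (hI : ¬ jFC <:+: l) :
    scanJargon l = jR4 (jR3 (jR2 (jR1 l))) :=
  (scanC_eq_scan n l hl hI).symm.trans (chainC_eq n l hl)

-- B's scan walks through a cascade occurrence: twelve copies, then the canopy rule
lemma scanFC (x : List Char) : scanJargon (jFC ++ x) = jCC ++ (jD2 ++ scanJargon x) := by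
  have h0 : scanJargon (jFC.drop 0 ++ x) = 'f' :: scanJargon (jFC.drop 1 ++ x) := by
    rw [show jFC.drop 0 = 'f' :: jFC.drop 1 from by decide, List.cons_append, scanJ_cons,
      if_neg (npb jP1 'f' (jFC.drop 1) (by decide) (by decide)),
      if_neg (npb jP2 'f' (jFC.drop 1) (by decide) (by decide)),
      if_neg (npb jP3 'f' (jFC.drop 1) (by decide) (by decide)),
      if_neg (npb jP4 'f' (jFC.drop 1) (by decide) (by decide))]
  have h1 : scanJargon (jFC.drop 1 ++ x) = 'l' :: scanJargon (jFC.drop 2 ++ x) := by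
    rw [show jFC.drop 1 = 'l' :: jFC.drop 2 from by decide, List.cons_append, scanJ_cons,
      if_neg (npb jP1 'l' (jFC.drop 2) (by decide) (by decide)),
      if_neg (npb jP2 'l' (jFC.drop 2) (by decide) (by decide)),
      if_neg (npb jP3 'l' (jFC.drop 2) (by decide) (by decide)),
      if_neg (npb jP4 'l' (jFC.drop 2) (by decide) (by decide))]
  have h2 : scanJargon (jFC.drop 2 ++ x) = 'a' :: scanJargon (jFC.drop 3 ++ x) := by
    rw [show jFC.drop 2 = 'a' :: jFC.drop 3 from by decide, List.cons_append, scanJ_cons,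
      if_neg (npb jP1 'a' (jFC.drop 3) (by decide) (by decide)),
      if_neg (npb jP2 'a' (jFC.drop 3) (by decide) (by decide)),
      if_neg (npb jP3 'a' (jFC.drop 3) (by decide) (by decide)),
      if_neg (npb jP4 'a' (jFC.drop 3) (by decide) (by decide))]
  have h3 : scanJargon (jFC.drop 3 ++ x) = 'm' :: scanJargon (jFC.drop 4 ++ x) := by
    rw [show jFC.drop 3 = 'm' :: jFC.drop 4 from by decide, List.cons_append, scanJ_cons,
      if_neg (npb jP1 'm' (jFC.drop 4) (by decide) (by decide)),
      if_neg (npb jP2 'm' (jFC.drop 4) (by decide) (by decide)),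
      if_neg (npb jP3 'm' (jFC.drop 4) (by decide) (by decide)),
      if_neg (npb jP4 'm' (jFC.drop 4) (by decide) (by decide))]
  have h4 : scanJargon (jFC.drop 4 ++ x) = 'e' :: scanJargon (jFC.drop 5 ++ x) := by
    rw [show jFC.drop 4 = 'e' :: jFC.drop 5 from by decide, List.cons_append, scanJ_cons,
      if_neg (npb jP1 'e' (jFC.drop 5) (by decide) (by decide)),
      if_neg (npb jP2 'e' (jFC.drop 5) (by decide) (by decide)),
      if_neg (npb jP3 'e' (jFC.drop 5) (by decide) (by decide)),
      if_neg (npb jP4 'e' (jFC.drop 5) (by decide) (by decide))]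
  have h5 : scanJargon (jFC.drop 5 ++ x) = '-' :: scanJargon (jFC.drop 6 ++ x) := by
    rw [show jFC.drop 5 = '-' :: jFC.drop 6 from by decide, List.cons_append, scanJ_cons,
      if_neg (npb jP1 '-' (jFC.drop 6) (by decide) (by decide)),
      if_neg (npb jP2 '-' (jFC.drop 6) (by decide) (by decide)),
      if_neg (npb jP3 '-' (jFC.drop 6) (by decide) (by decide)),
      if_neg (npb jP4 '-' (jFC.drop 6) (by decide) (by decide))]
  have h6 : scanJargon (jFC.drop 6 ++ x) = 'c' :: scanJargon (jFC.drop 7 ++ x) := by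
    rw [show jFC.drop 6 = 'c' :: jFC.drop 7 from by decide, List.cons_append, scanJ_cons,
      if_neg (npb jP1 'c' (jFC.drop 7) (by decide) (by decide)),
      if_neg (npb jP2 'c' (jFC.drop 7) (by decide) (by decide)),
      if_neg (npb jP3 'c' (jFC.drop 7) (by decide) (by decide)),
      if_neg (npb jP4 'c' (jFC.drop 7) (by decide) (by decide))]
  have h7 : scanJargon (jFC.drop 7 ++ x) = 'o' :: scanJargon (jFC.drop 8 ++ x) := by
    rw [show jFC.drop 7 = 'o' :: jFC.drop 8 from by decide, List.cons_append, scanJ_cons,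
      if_neg (npb jP1 'o' (jFC.drop 8) (by decide) (by decide)),
      if_neg (npb jP2 'o' (jFC.drop 8) (by decide) (by decide)),
      if_neg (npb jP3 'o' (jFC.drop 8) (by decide) (by decide)),
      if_neg (npb jP4 'o' (jFC.drop 8) (by decide) (by decide))]
  have h8 : scanJargon (jFC.drop 8 ++ x) = 'n' :: scanJargon (jFC.drop 9 ++ x) := by
    rw [show jFC.drop 8 = 'n' :: jFC.drop 9 from by decide, List.cons_append, scanJ_cons,
      if_neg (npb jP1 'n' (jFC.drop 9) (by decide) (by decide)),
      if_neg (npb jP2 'n' (jFC.drop 9) (by decide) (by decide)),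
      if_neg (npb jP3 'n' (jFC.drop 9) (by decide) (by decide)),
      if_neg (npb jP4 'n' (jFC.drop 9) (by decide) (by decide))]
  have h9 : scanJargon (jFC.drop 9 ++ x) = 't' :: scanJargon (jFC.drop 10 ++ x) := by
    rw [show jFC.drop 9 = 't' :: jFC.drop 10 from by decide, List.cons_append, scanJ_cons,
      if_neg (npb jP1 't' (jFC.drop 10) (by decide) (by decide)),
      if_neg (npb jP2 't' (jFC.drop 10) (by decide) (by decide)),
      if_neg (npb jP3 't' (jFC.drop 10) (by decide) (by decide)),
      if_neg (npb jP4 't' (jFC.drop 10) (by decide) (by decide))]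
  have h10 : scanJargon (jFC.drop 10 ++ x) = 'a' :: scanJargon (jFC.drop 11 ++ x) := by
    rw [show jFC.drop 10 = 'a' :: jFC.drop 11 from by decide, List.cons_append, scanJ_cons,
      if_neg (npb jP1 'a' (jFC.drop 11) (by decide) (by decide)),
      if_neg (npb jP2 'a' (jFC.drop 11) (by decide) (by decide)),
      if_neg (npb jP3 'a' (jFC.drop 11) (by decide) (by decide)),
      if_neg (npb jP4 'a' (jFC.drop 11) (by decide) (by decide))]
  have h11 : scanJargon (jFC.drop 11 ++ x) = 'c' :: scanJargon (jFC.drop 12 ++ x) := by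
    rw [show jFC.drop 11 = 'c' :: jFC.drop 12 from by decide, List.cons_append, scanJ_cons,
      if_neg (npb jP1 'c' (jFC.drop 12) (by decide) (by decide)),
      if_neg (npb jP2 'c' (jFC.drop 12) (by decide) (by decide)),
      if_neg (npb jP3 'c' (jFC.drop 12) (by decide) (by decide)),
      if_neg (npb jP4 'c' (jFC.drop 12) (by decide) (by decide))]
  have h12 : scanJargon (jFC.drop 12 ++ x) = jD2 ++ scanJargon x := by
    rw [show jFC.drop 12 ++ x = 'c' :: ("anopy".toList ++ x) from by
        rw [show jFC.drop 12 = 'c' :: "anopy".toList from by decide, List.cons_append]]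
    rw [scanJ_cons,
      if_neg (npb jP1 'c' "anopy".toList (by decide) (by decide)),
      if_pos (show jP2.isPrefixOf ('c' :: ("anopy".toList ++ x)) = true from
        List.isPrefixOf_iff_prefix.mpr (by
          rw [jP2c]
          exact List.cons_prefix_cons.mpr ⟨rfl, ("anopy".toList).prefix_append x⟩))]
    rfl
  rw [show jFC ++ x = jFC.drop 0 ++ x from by rw [List.drop_zero], h0, h1, h2, h3, h4, h5,
    h6, h7, h8, h9, h10, h11, h12,
    show jCC = ['f', 'l', 'a', 'm', 'e', '-', 'c', 'o', 'n', 't', 'a', 'c'] from by decide]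
  simp only [List.cons_append, List.nil_append]

-- one pass of B never produces a longer text than the ghost scanner
lemma scan_le_scanC : ∀ (n : Nat) (l : List Char), l.length ≤ n →
    (scanJargon l).length ≤ (scanC l).length := by
  intro n
  induction n with
  | zero =>
    intro l hl
    have h0 : l = [] := List.eq_nil_of_length_eq_zero (by omega)
    subst h0
    rw [show scanC [] = [] from by rw [scanC], show scanJargon [] = [] from by rw [scanJargon]]
  | succ n ih =>
    intro l hl
    cases l with
    | nil =>
      rw [show scanC [] = [] from by rw [scanC], show scanJargon [] = [] from by rw [scanJargon]]
    | cons c t =>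
      have hlen : ∀ k : Nat, 0 < k → ((c :: t).drop k).length ≤ n := by
        intro k hk
        simp only [List.length_drop, List.length_cons] at *
        omega
      by_cases hFCb : jFC.isPrefixOf (c :: t) = true
      · obtain ⟨r, hr⟩ := List.isPrefixOf_iff_prefix.mp hFCb
        have hdrop : (c :: t).drop 18 = r := by
          rw [← hr, show (18 : Nat) = jFC.length from by decide, List.drop_left]
        have hC : scanC (c :: t) = jDC ++ scanC r := by
          rw [scanC_cons, if_pos hFCb, hdrop]
        have hJ : scanJargon (c :: t) = jCC ++ (jD2 ++ scanJargon r) := by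
          rw [← hr, scanFC]
        have hihr := ih r (by rw [← hdrop]; exact hlen 18 (by omega))
        rw [hC, hJ]
        simp only [List.length_append]
        rw [show jCC.length = 12 from by decide, show jD2.length = 10 from by decide,
          show jDC.length = 29 from by decide]
        omega
      · by_cases h1 : jP1.isPrefixOf (c :: t) = true
        · have hC : scanC (c :: t) = jD1 ++ scanC ((c :: t).drop 10) := by
            rw [scanC_cons, if_neg hFCb, if_pos h1]
          have hJ : scanJargon (c :: t) = jD1 ++ scanJargon ((c :: t).drop 10) := by
            rw [scanJ_cons, if_pos h1]
          rw [hC, hJ]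
          simp only [List.length_append]
          have := ih _ (hlen 10 (by omega))
          omega
        · by_cases h2 : jP2.isPrefixOf (c :: t) = true
          · have hC : scanC (c :: t) = jD2 ++ scanC ((c :: t).drop 6) := by
              rw [scanC_cons, if_neg hFCb, if_neg h1, if_pos h2]
            have hJ : scanJargon (c :: t) = jD2 ++ scanJargon ((c :: t).drop 6) := by
              rw [scanJ_cons, if_neg h1, if_pos h2]
            rw [hC, hJ]
            simp only [List.length_append]
            have := ih _ (hlen 6 (by omega))
            omega
          · by_cases h3 : jP3.isPrefixOf (c :: t) = true
            · have hC : scanC (c :: t) = jD3 ++ scanC ((c :: t).drop 14) := by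
                rw [scanC_cons, if_neg hFCb, if_neg h1, if_neg h2, if_pos h3]
              have hJ : scanJargon (c :: t) = jD3 ++ scanJargon ((c :: t).drop 14) := by
                rw [scanJ_cons, if_neg h1, if_neg h2, if_pos h3]
              rw [hC, hJ]
              simp only [List.length_append]
              have := ih _ (hlen 14 (by omega))
              omega
            · by_cases h4 : jP4.isPrefixOf (c :: t) = true
              · have hC : scanC (c :: t) = jD4 ++ scanC ((c :: t).drop 13) := by
                  rw [scanC_cons, if_neg hFCb, if_neg h1, if_neg h2, if_neg h3, if_pos h4]
                have hJ : scanJargon (c :: t) = jD4 ++ scanJargon ((c :: t).drop 13) := by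
                  rw [scanJ_cons, if_neg h1, if_neg h2, if_neg h3, if_pos h4]
                rw [hC, hJ]
                simp only [List.length_append]
                have := ih _ (hlen 13 (by omega))
                omega
              · have hC : scanC (c :: t) = c :: scanC t := by
                  rw [scanC_cons, if_neg hFCb, if_neg h1, if_neg h2, if_neg h3, if_neg h4]
                have hJ : scanJargon (c :: t) = c :: scanJargon t := by
                  rw [scanJ_cons, if_neg h1, if_neg h2, if_neg h3, if_neg h4]
                have ht : t.length ≤ n := by simp only [List.length_cons] at hl; omega
                have := ih t ht
                rw [hC, hJ]
                simp only [List.length_cons]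
                omega

lemma infix_unpack (u : List Char)
    (hC : ∀ j < u.length, ¬ jFC <+: u.drop j ∧ ¬ u.drop j <+: jFC) :
    ∀ x : List Char, jFC <:+: u ++ x → jFC <:+: x := by
  induction u with
  | nil => intro x h; simpa using h
  | cons c u' ih =>
    intro x h
    rcases List.infix_cons_iff.mp (by simpa using h) with hpre | hinf
    · have h0 := hC 0 (by simp)
      simp only [List.drop_zero] at h0
      exact (npx h0.1 h0.2 (P := jFC) (u := c :: u') (x := x) hpre).elim
    · exact ih (fun j hj => by simpa using hC (j + 1) (by simp; omega)) x hinf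

-- inside a cascade B's one pass is strictly shorter than the ghost scanner (i.e. than A)
lemma scan_lt_scanC : ∀ (n : Nat) (l : List Char), l.length ≤ n → jFC <:+: l →
    (scanJargon l).length < (scanC l).length := by
  intro n
  induction n with
  | zero =>
    intro l hl hI
    have h0 : l = [] := List.eq_nil_of_length_eq_zero (by omega)
    subst h0
    have hle := hI.length_le
    rw [show jFC.length = 18 from by decide] at hle
    simp at hle
  | succ n ih =>
    intro l hl hI
    cases l with
    | nil =>
      have hle := hI.length_le
      rw [show jFC.length = 18 from by decide] at hle
      simp at hle
    | cons c t =>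
      have hlen : ∀ k : Nat, 0 < k → ((c :: t).drop k).length ≤ n := by
        intro k hk
        simp only [List.length_drop, List.length_cons] at *
        omega
      by_cases hFCb : jFC.isPrefixOf (c :: t) = true
      · obtain ⟨r, hr⟩ := List.isPrefixOf_iff_prefix.mp hFCb
        have hdrop : (c :: t).drop 18 = r := by
          rw [← hr, show (18 : Nat) = jFC.length from by decide, List.drop_left]
        have hC : scanC (c :: t) = jDC ++ scanC r := by
          rw [scanC_cons, if_pos hFCb, hdrop]
        have hJ : scanJargon (c :: t) = jCC ++ (jD2 ++ scanJargon r) := by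
          rw [← hr, scanFC]
        have hihr := scan_le_scanC r.length r le_rfl
        rw [hC, hJ]
        simp only [List.length_append]
        rw [show jCC.length = 12 from by decide, show jD2.length = 10 from by decide,
          show jDC.length = 29 from by decide]
        omega
      · by_cases h1 : jP1.isPrefixOf (c :: t) = true
        · obtain ⟨r, hr⟩ := List.isPrefixOf_iff_prefix.mp h1
          have hdrop : (c :: t).drop 10 = r := by
            rw [← hr, show (10 : Nat) = jP1.length from by decide, List.drop_left]
          have hIr : jFC <:+: r := infix_unpack jP1 (by decide) r (by rw [hr]; exact hI)
          have hC : scanC (c :: t) = jD1 ++ scanC ((c :: t).drop 10) := by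
            rw [scanC_cons, if_neg hFCb, if_pos h1]
          have hJ : scanJargon (c :: t) = jD1 ++ scanJargon ((c :: t).drop 10) := by
            rw [scanJ_cons, if_pos h1]
          rw [hC, hJ, hdrop]
          simp only [List.length_append]
          have := ih r (by rw [← hdrop]; exact hlen 10 (by omega)) hIr
          omega
        · by_cases h2 : jP2.isPrefixOf (c :: t) = true
          · obtain ⟨r, hr⟩ := List.isPrefixOf_iff_prefix.mp h2
            have hdrop : (c :: t).drop 6 = r := by
              rw [← hr, show (6 : Nat) = jP2.length from by decide, List.drop_left]
            have hIr : jFC <:+: r := infix_unpack jP2 (by decide) r (by rw [hr]; exact hI)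
            have hC : scanC (c :: t) = jD2 ++ scanC ((c :: t).drop 6) := by
              rw [scanC_cons, if_neg hFCb, if_neg h1, if_pos h2]
            have hJ : scanJargon (c :: t) = jD2 ++ scanJargon ((c :: t).drop 6) := by
              rw [scanJ_cons, if_neg h1, if_pos h2]
            rw [hC, hJ, hdrop]
            simp only [List.length_append]
            have := ih r (by rw [← hdrop]; exact hlen 6 (by omega)) hIr
            omega
          · by_cases h3 : jP3.isPrefixOf (c :: t) = true
            · obtain ⟨r, hr⟩ := List.isPrefixOf_iff_prefix.mp h3
              have hdrop : (c :: t).drop 14 = r := by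
                rw [← hr, show (14 : Nat) = jP3.length from by decide, List.drop_left]
              have hIr : jFC <:+: r := infix_unpack jP3 (by decide) r (by rw [hr]; exact hI)
              have hC : scanC (c :: t) = jD3 ++ scanC ((c :: t).drop 14) := by
                rw [scanC_cons, if_neg hFCb, if_neg h1, if_neg h2, if_pos h3]
              have hJ : scanJargon (c :: t) = jD3 ++ scanJargon ((c :: t).drop 14) := by
                rw [scanJ_cons, if_neg h1, if_neg h2, if_pos h3]
              rw [hC, hJ, hdrop]
              simp only [List.length_append]
              have := ih r (by rw [← hdrop]; exact hlen 14 (by omega)) hIr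
              omega
            · by_cases h4 : jP4.isPrefixOf (c :: t) = true
              · obtain ⟨r, hr⟩ := List.isPrefixOf_iff_prefix.mp h4
                have hdrop : (c :: t).drop 13 = r := by
                  rw [← hr, show (13 : Nat) = jP4.length from by decide, List.drop_left]
                have hIr : jFC <:+: r := infix_unpack jP4 (by decide) r (by rw [hr]; exact hI)
                have hC : scanC (c :: t) = jD4 ++ scanC ((c :: t).drop 13) := by
                  rw [scanC_cons, if_neg hFCb, if_neg h1, if_neg h2, if_neg h3, if_pos h4]
                have hJ : scanJargon (c :: t) = jD4 ++ scanJargon ((c :: t).drop 13) := by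
                  rw [scanJ_cons, if_neg h1, if_neg h2, if_neg h3, if_pos h4]
                rw [hC, hJ, hdrop]
                simp only [List.length_append]
                have := ih r (by rw [← hdrop]; exact hlen 13 (by omega)) hIr
                omega
              · have hC : scanC (c :: t) = c :: scanC t := by
                  rw [scanC_cons, if_neg hFCb, if_neg h1, if_neg h2, if_neg h3, if_neg h4]
                have hJ : scanJargon (c :: t) = c :: scanJargon t := by
                  rw [scanJ_cons, if_neg h1, if_neg h2, if_neg h3, if_neg h4]
                have ht : t.length ≤ n := by simp only [List.length_cons] at hl; omega
                have hIt : jFC <:+: t := by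
                  rcases List.infix_cons_iff.mp hI with hpre | hinf
                  · exact absurd hpre (by rw [← List.isPrefixOf_iff_prefix]; simpa using hFCb)
                  · exact hinf
                have := ih t ht hIt
                rw [hC, hJ]
                simp only [List.length_cons]
                omega

lemma capEq (a : String) (res : List Char) (h : a.toList = res) :
    (if a = "" then "" else pyCapFirst a.toList) = pyCapFirst res := by
  cases res with
  | nil =>
    rw [if_pos (String.toList_inj.mp (by rw [h]; rfl))]
    rfl
  | cons c t =>
    have ha : a ≠ "" := by
      intro e
      rw [e] at h
      simp at h
    rw [if_neg ha, h]

lemma chain_toList (lw : String) (h : ¬ jFC <:+: lw.toList) :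
    (let l1 := if PySem.Str.isIn "fuel model" lw then PySem.Str.replace lw "fuel model" "vegetation and dry brush conditions" else lw
     let l2 := if PySem.Str.isIn "canopy" l1 then PySem.Str.replace l1 "canopy" "tree cover" else l1
     let l3 := if PySem.Str.isIn "ember exposure" l2 then PySem.Str.replace l2 "ember exposure" "wind-blown ember exposure" else l2
     let l4 := if PySem.Str.isIn "flame-contact" l3 then PySem.Str.replace l3 "flame-contact" "direct flame contact" else l3
     l4).toList = scanJargon lw.toList := by
  have step : ∀ (sub dst x : String),
      (if PySem.Str.isIn sub x then PySem.Str.replace x sub dst else x).toList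
        = if PySem.Chars.isIn sub.toList x.toList then
            PySem.Chars.replace x.toList sub.toList dst.toList
          else x.toList := by
    intro sub dst x
    rw [PySem.Str.isIn_eq]
    by_cases hc : PySem.Chars.isIn sub.toList x.toList <;>
      simp [hc, PySem.Str.toList_replace]
  simp only []
  rw [step, step, step, step]
  rw [show ("fuel model".toList : List Char) = 'f' :: "uel model".toList from by decide,
    stepChars_eq]
  rw [show ("canopy".toList : List Char) = 'c' :: "anopy".toList from by decide,
    stepChars_eq]
  rw [show ("ember exposure".toList : List Char) = 'e' :: "mber exposure".toList from by decide,
    stepChars_eq]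
  rw [show ("flame-contact".toList : List Char) = 'f' :: "lame-contact".toList from by decide,
    stepChars_eq]
  rw [show ∀ y, replOcc 'f' "uel model".toList "vegetation and dry brush conditions".toList y = jR1 y from fun _ => rfl,
    show ∀ y, replOcc 'c' "anopy".toList "tree cover".toList y = jR2 y from fun _ => rfl,
    show ∀ y, replOcc 'e' "mber exposure".toList "wind-blown ember exposure".toList y = jR3 y from fun _ => rfl,
    show ∀ y, replOcc 'f' "lame-contact".toList "direct flame contact".toList y = jR4 y from fun _ => rfl]
  exact (scanJargon_eq lw.toList.length lw.toList le_rfl h).symm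

lemma chain_toList_chars (lw : String) :
    (let l1 := if PySem.Str.isIn "fuel model" lw then PySem.Str.replace lw "fuel model" "vegetation and dry brush conditions" else lw
     let l2 := if PySem.Str.isIn "canopy" l1 then PySem.Str.replace l1 "canopy" "tree cover" else l1
     let l3 := if PySem.Str.isIn "ember exposure" l2 then PySem.Str.replace l2 "ember exposure" "wind-blown ember exposure" else l2
     let l4 := if PySem.Str.isIn "flame-contact" l3 then PySem.Str.replace l3 "flame-contact" "direct flame contact" else l3
     l4).toList = jR4 (jR3 (jR2 (jR1 lw.toList))) := by
  have step : ∀ (sub dst x : String),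
      (if PySem.Str.isIn sub x then PySem.Str.replace x sub dst else x).toList
        = if PySem.Chars.isIn sub.toList x.toList then
            PySem.Chars.replace x.toList sub.toList dst.toList
          else x.toList := by
    intro sub dst x
    rw [PySem.Str.isIn_eq]
    by_cases hc : PySem.Chars.isIn sub.toList x.toList <;>
      simp [hc, PySem.Str.toList_replace]
  simp only []
  rw [step, step, step, step]
  rw [show ("fuel model".toList : List Char) = 'f' :: "uel model".toList from by decide,
    stepChars_eq]
  rw [show ("canopy".toList : List Char) = 'c' :: "anopy".toList from by decide,
    stepChars_eq]
  rw [show ("ember exposure".toList : List Char) = 'e' :: "mber exposure".toList from by decide,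
    stepChars_eq]
  rw [show ("flame-contact".toList : List Char) = 'f' :: "lame-contact".toList from by decide,
    stepChars_eq]
  rw [show ∀ y, replOcc 'f' "uel model".toList "vegetation and dry brush conditions".toList y = jR1 y from fun _ => rfl,
    show ∀ y, replOcc 'c' "anopy".toList "tree cover".toList y = jR2 y from fun _ => rfl,
    show ∀ y, replOcc 'e' "mber exposure".toList "wind-blown ember exposure".toList y = jR3 y from fun _ => rfl,
    show ∀ y, replOcc 'f' "lame-contact".toList "direct flame contact".toList y = jR4 y from fun _ => rfl]

lemma capLen (u : List Char) : ((pyCapFirst u).toList).length = u.length := by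
  cases u with
  | nil => rfl
  | cons c t => simp [pyCapFirst, String.toList_ofList]

lemma capContra (a : String) (res1 res2 : List Char) (h : a.toList = res1)
    (hlen : res2.length < res1.length) :
    (if a = "" then "" else pyCapFirst a.toList) ≠ pyCapFirst res2 := by
  intro heq
  by_cases ha : a = ""
  · have h0 : res1.length = 0 := by rw [← h, ha]; rfl
    omega
  · rw [if_neg ha, h] at heq
    have hlen2 := congrArg (fun z : String => z.toList.length) heq
    simp only [capLen] at hlen2
    omega

-- evaluation of B's scan on the witness (scanJargon is defined by well-founded recursion,
-- so the kernel cannot unfold it; we evaluate it by its equation instead)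
lemma scan_witness :
    scanJargon "flame-contaccanopy".toList = "flame-contactree cover".toList := by
  simp [scanJ_cons, scanJargon, jP1, jP2, jP3, jP4, jD2, List.isPrefixOf]

-- ===== VERDICT =====
set_option maxHeartbeats 1000000 in
theorem de_jargonize_py_spec : Claim_unchanged_de_jargonize_py := by
  intro text _ hnD
  show de_jargonize_py text = de_jargonize_py_alt text
  have htext : (if text = "" then "" else text) = text := by
    by_cases h : text = "" <;> simp [h]
  have hs : ¬ jFC <:+: (PySem.Str.lower (PySem.Str.strip text)).toList := by
    intro hbad
    apply hnD
    show PySem.Str.isIn "flame-contaccanopy" (PySem.Str.lower (PySem.Str.strip text)) = true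
    rw [PySem.Str.isIn_eq]
    exact (PySem.Chars.isIn_iff_infix _ _).mpr hbad
  simp only [de_jargonize_py, de_jargonize_py_alt, htext]
  by_cases hNe : PySem.Str.strip text = ""
  · rw [if_pos hNe, if_pos hNe]
  · rw [if_neg hNe, if_neg hNe]
    exact capEq _ _ (chain_toList (PySem.Str.lower (PySem.Str.strip text)) hs)

set_option maxHeartbeats 1000000 in
theorem de_jargonize_py_changed : Claim_changed_de_jargonize_py := by
  unfold Claim_changed_de_jargonize_py
  refine ⟨by decide, by decide, by decide, ?_, by decide⟩
  show de_jargonize_py_alt "flame-contaccanopy" = "Flame-contactree cover"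
  simp only [de_jargonize_py_alt]
  rw [if_neg (by decide)]
  rw [show (PySem.Str.lower (PySem.Str.strip (if ("flame-contaccanopy" : String) = "" then "" else "flame-contaccanopy"))).toList = "flame-contaccanopy".toList from by decide]
  rw [scan_witness]
  decide

set_option maxHeartbeats 1000000 in
theorem de_jargonize_py_tight : Claim_exact_de_jargonize_py := by
  intro text _ hD
  have hFCs : jFC <:+: (PySem.Str.lower (PySem.Str.strip text)).toList := by
    have hD' : PySem.Str.isIn "flame-contaccanopy" (PySem.Str.lower (PySem.Str.strip text)) = true := hD
    rw [PySem.Str.isIn_eq] at hD'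
    exact (PySem.Chars.isIn_iff_infix _ _).mp hD' 
  have hneS : PySem.Str.strip text ≠ "" := by
    intro e
    rw [e] at hFCs
    have hle := hFCs.length_le
    rw [show jFC.length = 18 from by decide,
      show ((PySem.Str.lower "").toList).length = 0 from by decide] at hle
    omega
  have htext : (if text = "" then "" else text) = text := by
    by_cases h : text = "" <;> simp [h]
  have h4 := (chain_toList_chars (PySem.Str.lower (PySem.Str.strip text))).trans
    ((chainC_eq (PySem.Str.lower (PySem.Str.strip text)).toList.length _ le_rfl).symm)
  have hlen := scan_lt_scanC (PySem.Str.lower (PySem.Str.strip text)).toList.length _ le_rfl hFCs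
  simp only [de_jargonize_py, de_jargonize_py_alt, htext]
  rw [if_neg hneS, if_neg hneS]
  exact capContra _ _ _ h4 hlen
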